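-- pv_equiv track=rewrite | github.com/thien-nhat/chess-class | main.py | meet_pieces
-- ===== SOURCE A (Python) =====
-- def meet_pieces(boardRow, rowIndex):
--     tempIndex = 0
--     for pRow, piece in enumerate(boardRow):
--             if piece.isdigit():
--                 tempIndex += int(piece)
--             else:
--                 if tempIndex == rowIndex:
--                     return 1
--                 tempIndex += 1
--     return 0
-- ===== SOURCE B (Python) =====
-- def meet_pieces(boardRow, rowIndex):
--     squares = []
--     for c in boardRow:
--         if c.isdigit():
--             squares.extend([False] * int(c))
--         else:
--             squares.append(True)
--     return 1 if 0 <= rowIndex < len(squares) and squares[rowIndex] else 0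
-- ===== Notes on version B (the rewrite author's own statement) =====
-- stated objective: alternative
-- what changed: A scans with a running square counter and early-returns on a matching piece; B first expands the FEN row into an explicit occupancy list (False per empty square, True per piece) and then answers by a single bounds-checked lookup at rowIndex.
import Mathlib
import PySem

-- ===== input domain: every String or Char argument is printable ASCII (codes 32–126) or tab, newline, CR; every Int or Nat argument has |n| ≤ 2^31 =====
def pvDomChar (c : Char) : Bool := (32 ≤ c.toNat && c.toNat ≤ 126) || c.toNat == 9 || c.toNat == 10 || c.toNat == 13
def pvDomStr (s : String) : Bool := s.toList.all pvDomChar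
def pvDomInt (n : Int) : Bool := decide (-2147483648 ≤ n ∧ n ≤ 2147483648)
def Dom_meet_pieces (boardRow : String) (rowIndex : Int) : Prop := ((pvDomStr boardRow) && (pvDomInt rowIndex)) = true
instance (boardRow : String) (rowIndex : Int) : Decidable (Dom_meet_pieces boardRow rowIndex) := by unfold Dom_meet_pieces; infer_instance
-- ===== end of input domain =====

-- B replaces A's running-counter scan with build-an-explicit-occupancy-list then direct lookup (alternative decomposition, same cost).


-- ===== PORT A =====
-- A's loop: running counter tempIndex; a digit jumps it, a piece at tempIndex = rowIndex returns 1.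
-- Char.isDigit = Python str.isdigit and c.toNat - 48 = int(c) on the printable-ASCII domain.
def meetLoopA (rowIndex : Int) : List Char → Int → Int
  | [], _ => 0
  | c :: rest, tempIndex =>
    if c.isDigit then
      meetLoopA rowIndex rest (tempIndex + ((c.toNat : Int) - 48))
    else
      if tempIndex = rowIndex then 1 else meetLoopA rowIndex rest (tempIndex + 1)

def meet_pieces (boardRow : String) (rowIndex : Int) : Int :=
  meetLoopA rowIndex boardRow.toList 0

-- ===== PORT B =====
-- B's expansion loop: a digit c contributes int(c) empty squares (false), a piece one true.
def expandRow : List Char → List Bool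
  | [] => []
  | c :: rest =>
    (if c.isDigit then List.replicate (c.toNat - 48) false else [true]) ++ expandRow rest

def meet_pieces_alt (boardRow : String) (rowIndex : Int) : Int :=
  let squares := expandRow boardRow.toList
  if (0 ≤ rowIndex ∧ rowIndex < (squares.length : Int)) ∧ squares.getD rowIndex.toNat false = true
  then 1 else 0

-- ===== PRECONDITION & SPEC =====
def Spec_meet_pieces (boardRow : String) (rowIndex : Int) (out : Int) : Prop := out = meet_pieces_alt boardRow rowIndex
instance (boardRow : String) (rowIndex : Int) (out : Int) : Decidable (Spec_meet_pieces boardRow rowIndex out) := by unfold Spec_meet_pieces; infer_instance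

-- ===== CLAIM (what is proved, stated in full; the proofs are below) =====
def Claim_equal_meet_pieces : Prop := ∀ (boardRow : String) (rowIndex : Int), Dom_meet_pieces boardRow rowIndex → Spec_meet_pieces boardRow rowIndex (meet_pieces boardRow rowIndex)

-- ===== LEMMAS AND PROOFS =====

-- occupancy of the expanded row at a (possibly negative / out-of-range) integer index
def occ : List Bool → Int → Bool
  | [], _ => false
  | b :: rest, j => if j = 0 then b else occ rest (j - 1)

theorem occ_neg (l : List Bool) (j : Int) (h : j < 0) : occ l j = false := by
  induction l generalizing j with
  | nil => rfl
  | cons b rest ih =>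
    simp only [occ, if_neg (by omega : j ≠ 0)]
    exact ih (j - 1) (by omega)

theorem occ_replicate_false (n : Nat) (e : List Bool) (j : Int) :
    occ (List.replicate n false ++ e) j = occ e (j - n) := by
  induction n generalizing j with
  | zero => simp
  | succ m ih =>
    by_cases h : j = 0
    · subst h
      simp only [List.replicate_succ, List.cons_append, occ]
      rw [if_pos trivial]
      exact (occ_neg e _ (by push_cast; omega)).symm
    · simp only [List.replicate_succ, List.cons_append, occ, if_neg h]
      rw [ih (j - 1)]
      congr 1
      push_cast
      omega

theorem occ_eq_guard (l : List Bool) (j : Int) :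
    occ l j = true ↔ (0 ≤ j ∧ j < (l.length : Int)) ∧ l.getD j.toNat false = true := by
  induction l generalizing j with
  | nil => simp [occ]
  | cons b rest ih =>
    by_cases h : j = 0
    · subst h; simp [occ]
    · simp only [occ, if_neg h]
      rw [ih (j - 1)]
      by_cases hneg : j < 0
      · constructor
        · rintro ⟨⟨h1, _⟩, _⟩; omega
        · rintro ⟨⟨h1, _⟩, _⟩; omega
      · have hj : 0 ≤ j := by omega
        have htn : j.toNat = (j - 1).toNat + 1 := by omega
        constructor
        · rintro ⟨⟨h1, h2⟩, h3⟩
          refine ⟨⟨by omega, by simp only [List.length_cons]; push_cast; omega⟩, ?_⟩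
          rw [htn]; simpa using h3
        · rintro ⟨⟨h1, h2⟩, h3⟩
          refine ⟨⟨by omega, by simp only [List.length_cons] at h2; push_cast at h2 ⊢; omega⟩, ?_⟩
          rw [htn] at h3; simpa using h3

theorem meetLoopA_occ (rowIndex : Int) (l : List Char) :
    ∀ t : Int, meetLoopA rowIndex l t = if occ (expandRow l) (rowIndex - t) then 1 else 0 := by
  induction l with
  | nil => intro t; simp [meetLoopA, expandRow, occ]
  | cons c rest ih =>
    intro t
    by_cases hd : c.isDigit
    · simp only [meetLoopA, expandRow, hd, if_true]
      have h48 : 48 ≤ c.toNat := by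
        simp only [Char.isDigit, Bool.and_eq_true, ge_iff_le, decide_eq_true_eq,
          UInt32.le_iff_toNat_le] at hd
        exact hd.1
      rw [ih, occ_replicate_false,
        show rowIndex - t - ((c.toNat - 48 : Nat) : Int) = rowIndex - (t + ((c.toNat : Int) - 48)) by omega]
    · simp only [meetLoopA, expandRow, hd, Bool.false_eq_true, if_false, List.singleton_append]
      by_cases ht : t = rowIndex
      · subst ht
        simp [occ]
      · rw [if_neg ht, ih]
        simp only [occ, if_neg (by omega : rowIndex - t ≠ 0)]
        rw [show rowIndex - t - 1 = rowIndex - (t + 1) by omega]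

-- ===== VERDICT (by name: the statement is the Claim_ definition above) =====
theorem meet_pieces_spec : Claim_equal_meet_pieces := by
  intro boardRow rowIndex _
  unfold Spec_meet_pieces meet_pieces meet_pieces_alt
  rw [meetLoopA_occ]
  have h := occ_eq_guard (expandRow boardRow.toList) rowIndex
  simp only [sub_zero]
  by_cases hc : occ (expandRow boardRow.toList) rowIndex = true
  · rw [if_pos hc, if_pos (h.mp hc)]
  · rw [if_neg (by simpa using hc), if_neg (fun hg => hc (h.mpr hg))]
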